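-- pv_equiv track=rewrite | github.com/chavia1409/MLProject | clickML/src/backend/code_generation_components/concrete_tools/import_manager.py | __imports_in_order
-- ===== SOURCE A (Python) =====
-- def __imports_in_order(import_list: list[str]) -> list[str]:
--     """Puts given imports in an order."""
--     ordered_import_list = []
--
--     starts_with_import = [imp for imp in import_list if imp.startswith("import")]
--     starts_with_import.sort()
--     ordered_import_list += starts_with_import
--
--     starts_with_from = [imp for imp in import_list if imp.startswith("from")]
--     starts_with_from.sort()
--     ordered_import_list += starts_with_from
--
--     return ordered_import_list
-- ===== SOURCE B (Python) =====
-- def __imports_in_order(import_list: list[str]) -> list[str]: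
--     """Puts given imports in an order."""
--     kept = [imp for imp in import_list
--             if imp.startswith("import") or imp.startswith("from")]
--     return sorted(kept, key=lambda imp: (0 if imp.startswith("import") else 1, imp))
-- ===== Notes on version B (the rewrite author's own statement) =====
-- stated objective: simpler
-- what changed: Replaces the two filter-then-sort passes and list concatenation with one filter and a single keyed sort whose tuple key (group tag, string) reproduces the import-before-from ordering.
import Mathlib
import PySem

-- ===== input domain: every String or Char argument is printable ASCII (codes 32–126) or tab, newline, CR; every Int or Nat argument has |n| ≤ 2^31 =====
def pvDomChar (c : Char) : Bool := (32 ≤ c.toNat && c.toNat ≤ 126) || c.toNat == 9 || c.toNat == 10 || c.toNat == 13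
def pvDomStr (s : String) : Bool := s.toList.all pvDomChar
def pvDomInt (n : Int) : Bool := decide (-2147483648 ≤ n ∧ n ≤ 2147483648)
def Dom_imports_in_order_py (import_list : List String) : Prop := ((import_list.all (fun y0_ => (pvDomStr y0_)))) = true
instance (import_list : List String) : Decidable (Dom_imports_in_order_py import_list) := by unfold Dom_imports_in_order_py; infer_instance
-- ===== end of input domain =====

-- B replaces A's two filter-then-sort passes with one filter and a single keyed sort (simpler decomposition; same behaviour).

-- ===== PORT A =====
def imports_in_order_py (import_list : List String) : List String :=
  let ordered_import_list : List String := []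
  let starts_with_import := import_list.filter (fun imp => PySem.Str.startswith imp "import")
  let starts_with_import := PySem.List.sorted starts_with_import (fun x => x) false
  let ordered_import_list := ordered_import_list ++ starts_with_import
  let starts_with_from := import_list.filter (fun imp => PySem.Str.startswith imp "from")
  let starts_with_from := PySem.List.sorted starts_with_from (fun x => x) false
  let ordered_import_list := ordered_import_list ++ starts_with_from
  ordered_import_list

-- ===== PORT B =====
def imports_in_order_py_alt (import_list : List String) : List String :=
  let kept := import_list.filter
    (fun imp => PySem.Str.startswith imp "import" || PySem.Str.startswith imp "from")
  PySem.List.sorted2 kept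
    (fun imp => if PySem.Str.startswith imp "import" then (0 : Int) else 1)
    (fun imp => imp) false

-- ===== PRECONDITION & SPEC =====
def Spec_imports_in_order_py (import_list : List String) (out : List String) : Prop := out = imports_in_order_py_alt import_list
instance (import_list : List String) (out : List String) : Decidable (Spec_imports_in_order_py import_list out) := by unfold Spec_imports_in_order_py; infer_instance

-- ===== CLAIM (what is proved, stated in full; the proofs are below) =====
def Claim_equal_imports_in_order_py : Prop := ∀ (import_list : List String), Dom_imports_in_order_py import_list → Spec_imports_in_order_py import_list (imports_in_order_py import_list)

-- ===== LEMMAS AND PROOFS =====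

-- The group tag B's key uses.
def pvTag (s : String) : Int := if PySem.Str.startswith s "import" then 0 else 1

-- No string starts with both "import" and "from".
theorem pv_not_both (s : String) :
    ¬ (PySem.Str.startswith s "import" = true ∧ PySem.Str.startswith s "from" = true) := by
  rintro ⟨h1, h2⟩
  rw [PySem.Str.startswith_eq, PySem.Chars.startswith_iff] at h1 h2
  obtain ⟨t, ht⟩ := h1
  rw [← ht] at h2
  exact absurd (List.cons_prefix_cons.mp h2).1 (by decide)

-- sorted2 with keys k1, k2 is sorted with the lexicographic key.
theorem pv_sorted2_eq_sorted_lex {α κ₁ κ₂ : Type} [LinearOrder κ₁] [LinearOrder κ₂]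
    (xs : List α) (k1 : α → κ₁) (k2 : α → κ₂) :
    PySem.List.sorted2 xs k1 k2 false =
      PySem.List.sorted xs (fun x => toLex (k1 x, k2 x)) false := by
  rw [PySem.List.sorted_eq_foldl_insertBy]
  show List.foldl (fun acc x => PySem.List.insertBy _ x acc) [] xs = _
  congr 1
  funext acc x
  congr 1
  funext a b
  rcases lt_trichotomy (k1 a) (k1 b) with h | h | h
  · simp [Prod.Lex.toLex_lt_toLex, h]
  · simp [Prod.Lex.toLex_lt_toLex, h, lt_irrefl]
  · simp only [Prod.Lex.toLex_lt_toLex]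
    have h1 : ¬ k1 a < k1 b := not_lt_of_gt h
    have h2 : k1 a ≠ k1 b := h.ne'
    simp [h1, h2, h]

-- Disjoint filters concatenated are a permutation of the disjunction filter.
theorem pv_filter_or_perm {α : Type} (p q : α → Bool)
    (h : ∀ x, ¬ (p x = true ∧ q x = true)) (xs : List α) :
    (xs.filter p ++ xs.filter q).Perm (xs.filter (fun x => p x || q x)) := by
  induction xs with
  | nil => simp
  | cons x xs ih =>
    by_cases hp : p x = true
    · have hq : q x = false := by
        cases hqx : q x
        · rfl
        · exact absurd ⟨hp, hqx⟩ (h x)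
      simpa [List.filter_cons, hp, hq] using ih.cons x
    · cases hqx : q x with
      | false => simpa [List.filter_cons, hp, hqx] using ih
      | true =>
        simp only [List.filter_cons, hp, hqx, Bool.or_true, if_true, Bool.false_eq_true,
          if_false, cond_false]
        exact (List.perm_middle.trans (ih.cons x))

theorem imports_in_order_py_spec : Claim_equal_imports_in_order_py := by
  intro import_list _
  show imports_in_order_py import_list = imports_in_order_py_alt import_list
  unfold imports_in_order_py imports_in_order_py_alt
  simp only [List.nil_append]
  rw [pv_sorted2_eq_sorted_lex]
  set si := PySem.List.sorted
      (import_list.filter (fun imp => PySem.Str.startswith imp "import")) (fun x => x) false with hsi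
  set sf := PySem.List.sorted
      (import_list.filter (fun imp => PySem.Str.startswith imp "from")) (fun x => x) false with hsf
  have hmi : ∀ s ∈ si, PySem.Str.startswith s "import" = true := by
    intro s hs
    have := (PySem.List.mem_sorted _ _ _ _).mp (hsi ▸ hs)
    exact (List.mem_filter.mp this).2
  have hmf : ∀ s ∈ sf, PySem.Str.startswith s "import" = false := by
    intro s hs
    have hf := (List.mem_filter.mp ((PySem.List.mem_sorted _ _ _ _).mp (hsf ▸ hs))).2
    cases hsw : PySem.Str.startswith s "import"
    · rfl
    · exact absurd ⟨hsw, hf⟩ (pv_not_both s)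
  refine Eq.symm (PySem.List.eq_of_perm_of_pairwise_le_of_injective
    (fun s => toLex (pvTag s, s)) ?_ ?_ ?_ ?_)
  · intro a b h
    simpa [Prod.ext_iff] using congrArg (fun x => (ofLex x).2) h
  · -- permutation: B's sorted list ~ A's concatenation
    refine ((PySem.List.sorted_perm _ _ _).trans
      ((pv_filter_or_perm _ _ pv_not_both import_list).symm)).trans ?_
    exact ((PySem.List.sorted_perm _ _ _).append (PySem.List.sorted_perm _ _ _)).symm
  · -- B's output is pairwise ≤ in the lex key
    have := PySem.List.sorted_pairwise
      (import_list.filter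
        (fun imp => PySem.Str.startswith imp "import" || PySem.Str.startswith imp "from"))
      (fun x => toLex ((if PySem.Str.startswith x "import" then (0 : Int) else 1), x))
    exact this.imp (by intro a b h; simpa [pvTag] using h)
  · -- A's output is pairwise ≤ in the lex key
    rw [List.pairwise_append]
    refine ⟨?_, ?_, ?_⟩
    · have hp := PySem.List.sorted_pairwise
        (import_list.filter (fun imp => PySem.Str.startswith imp "import")) (fun x => x)
      rw [← hsi] at hp
      refine hp.imp_of_mem ?_
      intro a b ha hb hab
      have : pvTag a = 0 := by unfold pvTag; rw [hmi a ha]; rfl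
      have hb0 : pvTag b = 0 := by unfold pvTag; rw [hmi b hb]; rfl
      exact Prod.Lex.toLex_le_toLex.mpr (Or.inr ⟨by rw [this, hb0], hab⟩)
    · have hp := PySem.List.sorted_pairwise
        (import_list.filter (fun imp => PySem.Str.startswith imp "from")) (fun x => x)
      rw [← hsf] at hp
      refine hp.imp_of_mem ?_
      intro a b ha hb hab
      have ha1 : pvTag a = 1 := by unfold pvTag; rw [hmf a ha]; rfl
      have hb1 : pvTag b = 1 := by unfold pvTag; rw [hmf b hb]; rfl
      exact Prod.Lex.toLex_le_toLex.mpr (Or.inr ⟨by rw [ha1, hb1], hab⟩)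
    · intro a ha b hb
      have ha0 : pvTag a = 0 := by unfold pvTag; rw [hmi a ha]; rfl
      have hb1 : pvTag b = 1 := by unfold pvTag; rw [hmf b hb]; rfl
      exact le_of_lt (Prod.Lex.toLex_lt_toLex.mpr (Or.inl (by rw [ha0, hb1]; norm_num)))
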